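-- pv_equiv track=rewrite | github.com/sanazbahargam/Faultline | fautline_algs.py | dist_homo
-- ===== SOURCE A (Python) =====
-- def dist_homo(p, center):
--     val = 0
--     for f in range(len(center)):
--         f_vals = center[f]
--         for k in f_vals.keys():
--             # counting dissimilarities
--             if k != p[f]:
--                 val = val + f_vals[k]
--     return val
-- ===== SOURCE B (Python) =====
-- def dist_homo(p, center):
--     # Two staged global passes instead of a nested filtered pass:
--     # grand total of all counts across all features, minus the total of the
--     # counts that match p (skipping empty feature dicts so p[f] is never read
--     # for them, as in the original).
--     total = sum(v for f_vals in center for v in f_vals.values())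
--     matched = sum(f_vals.get(p[f], 0) for f, f_vals in enumerate(center) if f_vals)
--     return total - matched
-- ===== Notes on version B (the rewrite author's own statement) =====
-- stated objective: alternative
-- what changed: Instead of a nested loop testing each key against p[f], B makes two staged global passes: one pass computes the grand total of all counts across all feature dicts, a second pass sums the counts that match p (dict.get with default 0, skipping empty dicts so p[f] is never read for them), and returns total minus matched.
import Mathlib
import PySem

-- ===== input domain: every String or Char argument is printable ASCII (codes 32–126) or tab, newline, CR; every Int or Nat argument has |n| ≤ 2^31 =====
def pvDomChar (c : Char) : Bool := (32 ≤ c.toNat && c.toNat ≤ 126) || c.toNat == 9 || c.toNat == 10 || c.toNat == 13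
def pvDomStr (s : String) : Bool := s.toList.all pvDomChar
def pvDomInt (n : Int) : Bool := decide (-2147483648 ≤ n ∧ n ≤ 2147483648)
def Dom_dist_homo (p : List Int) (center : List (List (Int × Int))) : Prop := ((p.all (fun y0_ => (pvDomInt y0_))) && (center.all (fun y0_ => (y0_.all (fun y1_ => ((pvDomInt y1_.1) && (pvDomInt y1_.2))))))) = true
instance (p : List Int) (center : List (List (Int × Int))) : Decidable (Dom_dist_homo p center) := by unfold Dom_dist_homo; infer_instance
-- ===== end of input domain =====

-- B replaces A's nested key-by-key inequality loop by two staged global passes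
-- (grand total of all counts, minus total of the counts matching p): alternative decomposition.

-- ===== PORT A =====
-- Literal port of A: for f in range(len(center)): for k in center[f].keys(): if k != p[f]: val += center[f][k].
-- pyGetD center f [] is exact (0 ≤ f < len center); pyGetD p f 0 is exact under Pre_ (p[f] is only
-- reached when center[f] is non-empty, and Pre_ then gives f < len p); f_vals[k] is the value paired
-- with k, exact since Pre_ requires the association list to have distinct keys (a Python dict always does).
def dist_homo (p : List Int) (center : List (List (Int × Int))) : Int :=
  (PySem.List.pyRange 0 center.length 1).foldl (fun val f =>
    let f_vals := PySem.List.pyGetD center f []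
    f_vals.foldl (fun val kv =>
      if kv.1 ≠ PySem.List.pyGetD p f 0 then val + kv.2 else val) val) 0

-- ===== PORT B =====
-- Port of Source B: total = sum over the flattened values of all feature dicts;
-- matched = sum of f_vals.get(p[f], 0) over the non-empty entries of enumerate(center);
-- result = total - matched.  dict.get is first-match lookup on the association list, default 0.
def dist_homo_alt (p : List Int) (center : List (List (Int × Int))) : Int :=
  let total := (center.flatMap (fun f_vals => f_vals.map Prod.snd)).sum
  let matched := (((PySem.List.enumerate center 0).filter (fun fv => !fv.2.isEmpty)).map
      (fun fv => ((fv.2.find? (fun kv => kv.1 == PySem.List.pyGetD p fv.1 0)).map Prod.snd).getD 0)).sum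
  total - matched

-- ===== PRECONDITION & SPEC =====
-- Pre_ excludes (a) inputs where Python A raises IndexError (a non-empty feature dict at an index ≥ len(p));
-- (b) association lists with duplicate keys, which cannot arise from a Python dict.
def Pre_dist_homo (p : List Int) (center : List (List (Int × Int))) : Prop :=
  ∀ i : Nat, ∀ h : i < center.length,
    ((center[i] ≠ []) → i < p.length) ∧ (center[i].map Prod.fst).Nodup
instance (p : List Int) (center : List (List (Int × Int))) : Decidable (Pre_dist_homo p center) := by unfold Pre_dist_homo; infer_instance
def pvWitness_dist_homo : List Int × (List (List (Int × Int))) := ([1, 2], [[(1, 3), (2, 4)], [(5, 1)]])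
def Spec_dist_homo (p : List Int) (center : List (List (Int × Int))) (out : Int) : Prop := out = dist_homo_alt p center
instance (p : List Int) (center : List (List (Int × Int))) (out : Int) : Decidable (Spec_dist_homo p center out) := by unfold Spec_dist_homo; infer_instance

-- ===== CLAIM (what is proved, stated in full; the proofs are below) =====
def Claim_equal_dist_homo : Prop := ∀ (p : List Int) (center : List (List (Int × Int))), Dom_dist_homo p center → Pre_dist_homo p center → Spec_dist_homo p center (dist_homo p center)

-- ===== LEMMAS AND PROOFS =====

-- per-feature matched count of B
def pvMatch (p : List Int) (fv : Int × List (Int × Int)) : Int :=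
  ((fv.2.find? (fun kv => kv.1 == PySem.List.pyGetD p fv.1 0)).map Prod.snd).getD 0

-- accumulate-then-add shape of A's inner loop
lemma foldl_ite_add (x : Int) :
    ∀ (l : List (Int × Int)) (val : Int),
      l.foldl (fun v kv => if kv.1 ≠ x then v + kv.2 else v) val
        = val + (l.map (fun kv => if kv.1 = x then 0 else kv.2)).sum := by
  intro l
  induction l with
  | nil => intro val; simp
  | cons kv t ih =>
      intro val
      simp only [List.foldl_cons, List.map_cons, List.sum_cons, ih]
      by_cases h : kv.1 = x
      · simp [h]
      · simp [h]; ring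

lemma map_ite_of_not_mem (x : Int) (t : List (Int × Int)) (hx : x ∉ t.map Prod.fst) :
    t.map (fun kv => if kv.1 = x then 0 else kv.2) = t.map Prod.snd := by
  apply List.map_congr_left
  intro kv hkv
  have : kv.1 ≠ x := by
    intro h; exact hx (h ▸ List.mem_map_of_mem hkv)
  simp [this]

lemma sum_ite_eq_sub (x : Int) :
    ∀ (l : List (Int × Int)), (l.map Prod.fst).Nodup →
      (l.map (fun kv => if kv.1 = x then 0 else kv.2)).sum
        = (l.map Prod.snd).sum
          - (((l.find? (fun kv => kv.1 == x)).map Prod.snd).getD 0) := by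
  intro l
  induction l with
  | nil => simp
  | cons kv t ih =>
      intro hnd
      simp only [List.map_cons, List.nodup_cons] at hnd
      by_cases h : kv.1 = x
      · have hx : x ∉ t.map Prod.fst := h ▸ hnd.1
        simp [h, map_ite_of_not_mem x t hx]
      · have hbeq : (kv.1 == x) = false := by simp [h]
        simp only [List.map_cons, List.sum_cons, List.find?_cons, hbeq, ih hnd.2]
        simp [h]
        ring

-- sum of a map over a filter equals the unfiltered sum when dropped terms are 0
lemma sum_map_filter_of_zero {α : Type} (q : α → Bool) (m : α → Int)
    (hz : ∀ x, q x = false → m x = 0) :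
    ∀ l : List α, ((l.filter q).map m).sum = (l.map m).sum := by
  intro l
  induction l with
  | nil => simp
  | cons x t ih =>
      by_cases h : q x = true
      · simp [h, ih]
      · have h0 : q x = false := by simpa using h
        simp [h0, hz x h0, ih]

-- sum of pointwise differences
lemma sum_map_sub {α : Type} (f g : α → Int) :
    ∀ l : List α, (l.map (fun x => f x - g x)).sum = (l.map f).sum - (l.map g).sum := by
  intro l
  induction l with
  | nil => simp
  | cons x t ih => simp [ih]; ring

-- ===== VERDICT (by name: the statement is the Claim_ definition above) =====
theorem dist_homo_spec : Claim_equal_dist_homo := by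
  intro p center _ hpre
  unfold Spec_dist_homo dist_homo dist_homo_alt
  -- A as a fold over enumerate center 0
  have h1 : (PySem.List.enumerate center 0).foldl (fun val fv =>
      fv.2.foldl (fun val kv =>
        if kv.1 ≠ PySem.List.pyGetD p fv.1 0 then val + kv.2 else val) val) 0
      = (PySem.List.pyRange 0 center.length 1).foldl (fun val f =>
          let f_vals := PySem.List.pyGetD center f []
          f_vals.foldl (fun val kv =>
            if kv.1 ≠ PySem.List.pyGetD p f 0 then val + kv.2 else val) val) 0 := by
    rw [PySem.List.enumerate_eq_map_pyRange (d := ([] : List (Int × Int))), List.foldl_map,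
      PySem.List.len_eq]
  -- each step of that fold adds the per-feature "total minus matched"
  have hcongr : ∀ (val : Int) (fv : Int × List (Int × Int)),
      fv ∈ PySem.List.enumerate center 0 →
      fv.2.foldl (fun val kv =>
        if kv.1 ≠ PySem.List.pyGetD p fv.1 0 then val + kv.2 else val) val
        = val + ((fv.2.map Prod.snd).sum - pvMatch p fv) := by
    intro val fv hfv
    obtain ⟨k, hk, rfl⟩ := (PySem.List.mem_enumerate_iff _ _ _).mp hfv
    have hnd := (hpre k hk).2
    rw [foldl_ite_add, sum_ite_eq_sub _ _ hnd]
    rfl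
  have h2 := PySem.List.foldl_congr_mem (PySem.List.enumerate center 0)
    (fun val fv => fv.2.foldl (fun val kv =>
      if kv.1 ≠ PySem.List.pyGetD p fv.1 0 then val + kv.2 else val) val)
    (fun val fv => val + ((fv.2.map Prod.snd).sum - pvMatch p fv))
    (0 : Int) hcongr
  have h3 := PySem.List.foldl_add
    (l := PySem.List.enumerate center 0)
    (g := fun fv => (fv.2.map Prod.snd).sum - pvMatch p fv) (a := (0 : Int))
  -- B's two staged sums, re-expressed over enumerate
  have htot : (center.flatMap (fun f_vals => f_vals.map Prod.snd)).sum
      = ((PySem.List.enumerate center 0).map (fun fv => (fv.2.map Prod.snd).sum)).sum := by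
    have hm : (PySem.List.enumerate center 0).map (fun fv => (fv.2.map Prod.snd).sum)
        = ((PySem.List.enumerate center 0).map (fun fv => fv.2)).map
            (fun d => (d.map Prod.snd).sum) := by
      rw [List.map_map]; rfl
    rw [hm, PySem.List.map_snd_enumerate, List.flatMap_def, List.sum_flatten, List.map_map]
    rfl
  have hmatch : (((PySem.List.enumerate center 0).filter (fun fv => !fv.2.isEmpty)).map
      (fun fv => ((fv.2.find? (fun kv => kv.1 == PySem.List.pyGetD p fv.1 0)).map Prod.snd).getD 0)).sum
      = ((PySem.List.enumerate center 0).map (fun fv => pvMatch p fv)).sum := by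
    exact sum_map_filter_of_zero _ _ (by
      intro fv hq
      have he : fv.2 = [] := by simpa [List.isEmpty_iff] using hq
      simp [pvMatch, he]) _
  show _ = (center.flatMap (fun f_vals => f_vals.map Prod.snd)).sum
      - (((PySem.List.enumerate center 0).filter (fun fv => !fv.2.isEmpty)).map
          (fun fv => ((fv.2.find? (fun kv => kv.1 == PySem.List.pyGetD p fv.1 0)).map Prod.snd).getD 0)).sum
  rw [← h1, h2, h3, htot, hmatch, ← sum_map_sub]
  ring
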